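-- pv_equiv track=rewrite | github.com/willherzog/GeneralsGameCode | scripts/cpp/refactor_delete_instance.py | modifyLine
-- ===== SOURCE A (Python) =====
-- def modifyLine(line: str) -> str:
--     if 'friend_deleteInstance()' in line:
--         return line
--
--     deleteInstanceBegin = line.find('deleteInstance()')
--     deleteInstanceEnd = deleteInstanceBegin + len('deleteInstance()')
--     if deleteInstanceBegin >= 0:
--         i = deleteInstanceBegin
--
--         # Skip MemoryPoolObject::deleteInstance()
--         if i >= 2 and line[i-2:i] == '::':
--             return line
--
--         # Skip void deleteInstance()
--         if i >= 5 and line[i-5:i] == 'void ':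
--             return line
--
--         # Skip void friend_deleteInstance()
--         if i >= 5 and line[i-5:i] == 'void ':
--             return line
--
--         # Walk back to object end
--         i -= 1
--         while i >= 0:
--             ch = line[i]
--             if ch != '>' and ch != '-' and not ch.isspace():
--                 break
--             i -= 1
--         objectEnd = i + 1
--
--         # Walk back to object begin
--         while i >= 0:
--             ch = line[i]
--             if ch.isspace() or ch == '{' or ch == '}':
--                 break
--             i -= 1
--         objectBegin = i + 1
--         objectName = line[objectBegin:objectEnd]
--
--         if objectName:
--             lineCopy = line[:objectBegin]
--             lineCopy += f'MemoryPoolObject::deleteInstance({objectName})'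
--             lineCopy += line[deleteInstanceEnd:]
--             return lineCopy
--         else:
--             lineCopy = line[:deleteInstanceBegin]
--             lineCopy += 'MemoryPoolObject::deleteInstance(this)'
--             lineCopy += line[deleteInstanceEnd:]
--             return lineCopy
--
--     return line
-- ===== SOURCE B (Python) =====
-- def modifyLine(line: str) -> str:
--     if 'friend_deleteInstance()' in line:
--         return line
--
--     pre, sep, post = line.partition('deleteInstance()')
--     if not sep:
--         return line
--
--     # Skip MemoryPoolObject::deleteInstance() and void deleteInstance()
--     if pre.endswith('::') or pre.endswith('void '):
--         return line
--
--     # One forward pass over the prefix: track the start of the current token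
--     # (after the last whitespace/brace) and, at each character that is not
--     # arrow-glue/whitespace, snapshot the name span ending there.
--     tokStart = 0
--     nameStart = 0
--     nameEnd = 0
--     for i, ch in enumerate(pre):
--         if ch.isspace() or ch == '{' or ch == '}':
--             tokStart = i + 1
--         if not (ch.isspace() or ch == '>' or ch == '-'):
--             nameStart = tokStart
--             nameEnd = i + 1
--
--     if nameEnd > nameStart:
--         return pre[:nameStart] + f'MemoryPoolObject::deleteInstance({pre[nameStart:nameEnd]})' + post
--     return pre + 'MemoryPoolObject::deleteInstance(this)' + post
-- ===== Notes on version B (the rewrite author's own statement) =====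
-- stated objective: alternative
-- what changed: Replaces find() plus two backward index-walking while-loops over the whole line by partition/endswith guards and a single forward left-to-right pass over the prefix that maintains accumulators (current token start and the last name span snapshot) instead of walking back from the call site.
import Mathlib
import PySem

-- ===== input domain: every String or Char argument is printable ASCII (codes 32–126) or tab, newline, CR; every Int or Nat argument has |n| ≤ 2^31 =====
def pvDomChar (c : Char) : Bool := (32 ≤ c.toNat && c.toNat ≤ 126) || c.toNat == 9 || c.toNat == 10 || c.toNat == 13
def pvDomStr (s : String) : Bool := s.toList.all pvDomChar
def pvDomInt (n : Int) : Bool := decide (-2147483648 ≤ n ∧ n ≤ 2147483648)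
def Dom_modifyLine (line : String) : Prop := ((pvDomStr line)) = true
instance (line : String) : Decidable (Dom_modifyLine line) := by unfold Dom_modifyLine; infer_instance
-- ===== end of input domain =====

-- B replaces A's find() + two backward index-walking while-loops by partition/endswith guards
-- and a single forward pass over the prefix keeping accumulators (same cost; alternative).

-- ===== PORT A =====

-- while i >= 0: break unless line[i] is '>' / '-' / whitespace; i -= 1
def pvWalkEnd (s : List Char) (i : Int) : Int :=
  if _h : 0 ≤ i then
    match PySem.List.pyGet? s i with
    | some ch => if ch ≠ '>' ∧ ch ≠ '-' ∧ PySem.Chars.isspace ch = false then i else pvWalkEnd s (i - 1)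
    | none => i
  else i
termination_by (i + 1).toNat
decreasing_by omega

-- while i >= 0: break if line[i] is whitespace / '{' / '}'; i -= 1
def pvWalkBegin (s : List Char) (i : Int) : Int :=
  if _h : 0 ≤ i then
    match PySem.List.pyGet? s i with
    | some ch => if PySem.Chars.isspace ch = true ∨ ch = '{' ∨ ch = '}' then i else pvWalkBegin s (i - 1)
    | none => i
  else i
termination_by (i + 1).toNat
decreasing_by omega

def modifyLine (line : String) : String :=
  let s := line.toList
  if PySem.Chars.isIn "friend_deleteInstance()".toList s then line
  else
    let b := PySem.Chars.find s "deleteInstance()".toList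
    let e := b + 16
    if 0 ≤ b then
      if 2 ≤ b ∧ PySem.List.slice s (some (b - 2)) (some b) = "::".toList then line
      else if 5 ≤ b ∧ PySem.List.slice s (some (b - 5)) (some b) = "void ".toList then line
      else if 5 ≤ b ∧ PySem.List.slice s (some (b - 5)) (some b) = "void ".toList then line
      else
        let i1 := pvWalkEnd s (b - 1)
        let objectEnd := i1 + 1
        let i2 := pvWalkBegin s i1
        let objectBegin := i2 + 1
        let objectName := PySem.List.slice s (some objectBegin) (some objectEnd)
        if objectName ≠ [] then
          String.ofList (PySem.List.slice s none (some objectBegin)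
            ++ "MemoryPoolObject::deleteInstance(".toList ++ objectName ++ [')']
            ++ PySem.List.slice s (some e) none)
        else
          String.ofList (PySem.List.slice s none (some b)
            ++ "MemoryPoolObject::deleteInstance(this)".toList
            ++ PySem.List.slice s (some e) none)
    else line

-- ===== PORT B =====

-- the body of Source B's for-loop over enumerate(pre): state = (tokStart, nameStart, nameEnd)
def pvScanStep (st : Int × Int × Int) (p : Int × Char) : Int × Int × Int :=
  let tokStart := if PySem.Chars.isspace p.2 || p.2 == '{' || p.2 == '}' then p.1 + 1 else st.1
  if !(PySem.Chars.isspace p.2 || p.2 == '>' || p.2 == '-') then (tokStart, tokStart, p.1 + 1)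
  else (tokStart, st.2.1, st.2.2)

def modifyLine_alt (line : String) : String :=
  let s := line.toList
  if PySem.Chars.isIn "friend_deleteInstance()".toList s then line
  else
    -- line.partition('deleteInstance()'): split at the FIRST occurrence (empty sep = not found)
    let n := PySem.Chars.find s "deleteInstance()".toList
    if n = -1 then line
    else
      let pre := PySem.List.slice s none (some n)
      let post := PySem.List.slice s (some (n + 16)) none
      if PySem.Chars.endswith pre "::".toList || PySem.Chars.endswith pre "void ".toList then line
      else
        let st := (PySem.List.enumerate pre 0).foldl pvScanStep (0, 0, 0)
        let nameStart := st.2.1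
        let nameEnd := st.2.2
        if nameStart < nameEnd then
          String.ofList (PySem.List.slice pre none (some nameStart)
            ++ "MemoryPoolObject::deleteInstance(".toList
            ++ PySem.List.slice pre (some nameStart) (some nameEnd) ++ [')'] ++ post)
        else
          String.ofList (pre ++ "MemoryPoolObject::deleteInstance(this)".toList ++ post)

-- ===== PRECONDITION & SPEC =====
def Spec_modifyLine (line : String) (out : String) : Prop := out = modifyLine_alt line
instance (line : String) (out : String) : Decidable (Spec_modifyLine line out) := by unfold Spec_modifyLine; infer_instance

-- ===== CLAIM (what is proved, stated in full; the proofs are below) =====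
def Claim_equal_modifyLine : Prop := ∀ (line : String), Dom_modifyLine line → Spec_modifyLine line (modifyLine line)

-- ===== LEMMAS AND PROOFS =====

-- trailing run of '>' / '-' / whitespace (what A's first backward walk skips)
def pvTS (l : List Char) : Nat :=
  (l.reverse.takeWhile (fun ch => PySem.Chars.isspace ch || ch == '>' || ch == '-')).length

-- trailing run of non-breaker chars (what A's second backward walk takes as the name)
def pvTB (l : List Char) : Nat :=
  (l.reverse.takeWhile (fun ch => !(PySem.Chars.isspace ch || ch == '{' || ch == '}'))).length

theorem pvTS_le (l : List Char) : pvTS l ≤ l.length := by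
  have h := (List.takeWhile_sublist (l := l.reverse)
    (p := fun ch => PySem.Chars.isspace ch || ch == '>' || ch == '-')).length_le
  simpa [pvTS] using h

theorem pvTB_le (l : List Char) : pvTB l ≤ l.length := by
  have h := (List.takeWhile_sublist (l := l.reverse)
    (p := fun ch => !(PySem.Chars.isspace ch || ch == '{' || ch == '}'))).length_le
  simpa [pvTB] using h

theorem pvWalkEnd_spec (s : List Char) (n : Nat) (hn : n ≤ s.length) :
    pvWalkEnd s ((n : Int) - 1) = (n : Int) - 1 - (pvTS (s.take n) : Int) := by
  induction n with
  | zero =>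
    rw [pvWalkEnd]
    simp [pvTS]
  | succ n ih =>
    have hlt : n < s.length := by omega
    have hcast : ((n + 1 : Nat) : Int) - 1 = (n : Int) := by push_cast; ring
    have htake : s.take (n + 1) = s.take n ++ [s[n]] := by
      rw [List.take_add_one, List.getElem?_eq_getElem hlt]
      rfl
    rw [hcast, pvWalkEnd, dif_pos (Int.natCast_nonneg n), PySem.List.pyGet?_ofNat s n hlt]
    simp only [pvTS, htake, List.reverse_append, List.reverse_cons, List.reverse_nil,
      List.nil_append, List.cons_append, List.takeWhile_cons]
    by_cases hb : s[n] ≠ '>' ∧ s[n] ≠ '-' ∧ PySem.Chars.isspace s[n] = false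
    · rw [if_pos hb]
      have hP : (PySem.Chars.isspace s[n] || s[n] == '>' || s[n] == '-') = false := by
        simp [hb.1, hb.2.1, hb.2.2]
      rw [hP]
      simp only [Bool.false_eq_true, if_false, List.length_nil, Nat.cast_zero]
      omega
    · rw [if_neg hb]
      have hP : (PySem.Chars.isspace s[n] || s[n] == '>' || s[n] == '-') = true := by
        by_cases h1 : s[n] = '>'
        · simp [h1]
        · by_cases h2 : s[n] = '-'
          · simp [h2]
          · have h3 : PySem.Chars.isspace s[n] = true := by
              by_contra h3
              exact hb ⟨h1, h2, by simpa using h3⟩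
            simp [h3]
      rw [hP]
      simp only [if_true, List.length_cons]
      rw [ih (by omega)]
      simp only [pvTS]
      push_cast
      ring

theorem pvWalkBegin_spec (s : List Char) (n : Nat) (hn : n ≤ s.length) :
    pvWalkBegin s ((n : Int) - 1) = (n : Int) - 1 - (pvTB (s.take n) : Int) := by
  induction n with
  | zero =>
    rw [pvWalkBegin]
    simp [pvTB]
  | succ n ih =>
    have hlt : n < s.length := by omega
    have hcast : ((n + 1 : Nat) : Int) - 1 = (n : Int) := by push_cast; ring
    have htake : s.take (n + 1) = s.take n ++ [s[n]] := by
      rw [List.take_add_one, List.getElem?_eq_getElem hlt]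
      rfl
    rw [hcast, pvWalkBegin, dif_pos (Int.natCast_nonneg n), PySem.List.pyGet?_ofNat s n hlt]
    simp only [pvTB, htake, List.reverse_append, List.reverse_cons, List.reverse_nil,
      List.nil_append, List.cons_append, List.takeWhile_cons]
    by_cases hb : PySem.Chars.isspace s[n] = true ∨ s[n] = '{' ∨ s[n] = '}'
    · rw [if_pos hb]
      have hP : (!(PySem.Chars.isspace s[n] || s[n] == '{' || s[n] == '}')) = false := by
        rcases hb with h | h | h <;> simp [h]
      rw [hP]
      simp only [Bool.false_eq_true, if_false, List.length_nil, Nat.cast_zero]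
      omega
    · rw [if_neg hb]
      simp only [not_or] at hb
      have hP : (!(PySem.Chars.isspace s[n] || s[n] == '{' || s[n] == '}')) = true := by
        simp [hb.1, hb.2.1, hb.2.2]
      rw [hP]
      simp only [if_true, List.length_cons]
      rw [ih (by omega)]
      simp only [pvTB]
      push_cast
      ring

-- the forward scan computes exactly what A's two backward walks compute
theorem pvScan_spec (l : List Char) :
    (PySem.List.enumerate l 0).foldl pvScanStep (0, 0, 0) =
      (((l.length - pvTB l : Nat) : Int),
       ((l.length - pvTS l - pvTB (l.take (l.length - pvTS l)) : Nat) : Int),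
       ((l.length - pvTS l : Nat) : Int)) := by
  induction l using List.reverseRecOn with
  | nil => simp [PySem.List.enumerate_nil, pvTS, pvTB]
  | append_singleton l c ih =>
    have hTS : pvTS (l ++ [c]) =
        if (PySem.Chars.isspace c || c == '>' || c == '-') then pvTS l + 1 else 0 := by
      simp only [pvTS, List.reverse_append, List.reverse_cons, List.reverse_nil,
        List.nil_append, List.cons_append, List.takeWhile_cons]
      by_cases h : (PySem.Chars.isspace c || c == '>' || c == '-') = true
      · simp [h]
      · simp only [Bool.not_eq_true] at h
        simp [h]
    have hTB : pvTB (l ++ [c]) =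
        if (PySem.Chars.isspace c || c == '{' || c == '}') then 0 else pvTB l + 1 := by
      simp only [pvTB, List.reverse_append, List.reverse_cons, List.reverse_nil,
        List.nil_append, List.cons_append, List.takeWhile_cons]
      by_cases h : (PySem.Chars.isspace c || c == '{' || c == '}') = true
      · simp [h]
      · simp only [Bool.not_eq_true] at h
        simp [h]
    have hTSle := pvTS_le l
    have hTBle := pvTB_le l
    rw [PySem.List.enumerate_append, List.foldl_append, ih,
      show (l ++ [c]).length = l.length + 1 from by simp, hTS, hTB]
    by_cases hskip : (PySem.Chars.isspace c || c == '>' || c == '-') = true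
    · rw [if_pos hskip,
        show l.length + 1 - (pvTS l + 1) = l.length - pvTS l from by omega,
        List.take_append_of_le_length (by omega)]
      by_cases hbr : (PySem.Chars.isspace c || c == '{' || c == '}') = true
      · rw [if_pos hbr]
        simp only [PySem.List.enumerate_cons, PySem.List.enumerate_nil, List.foldl_cons,
          List.foldl_nil, pvScanStep, hskip, hbr, Bool.not_true, Bool.false_eq_true,
          if_false, if_true, Prod.mk.injEq, and_true, true_and]
        push_cast
        omega
      · rw [if_neg hbr]
        simp only [PySem.List.enumerate_cons, PySem.List.enumerate_nil, List.foldl_cons,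
          List.foldl_nil, pvScanStep, hskip, hbr, Bool.not_true, Bool.false_eq_true,
          if_false, Prod.mk.injEq, and_true, true_and]
        push_cast
        omega
    · have htk : List.take (l.length + 1) (l ++ [c]) = l ++ [c] :=
        List.take_of_length_le (by simp)
      rw [if_neg hskip, Nat.sub_zero, htk, hTB]
      by_cases hbr : (PySem.Chars.isspace c || c == '{' || c == '}') = true
      · rw [if_pos hbr]
        simp only [PySem.List.enumerate_cons, PySem.List.enumerate_nil, List.foldl_cons,
          List.foldl_nil, pvScanStep, hskip, hbr, Bool.not_false, Bool.false_eq_true,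
          if_true, Prod.mk.injEq, and_true, true_and]
        push_cast
        omega
      · rw [if_neg hbr]
        simp only [PySem.List.enumerate_cons, PySem.List.enumerate_nil, List.foldl_cons,
          List.foldl_nil, pvScanStep, hskip, hbr, Bool.not_false, Bool.false_eq_true,
          if_false, if_true, Prod.mk.injEq, and_true, true_and]
        push_cast
        omega

theorem pvSuffix_iff (s q : List Char) (n : Nat) (hn : n ≤ s.length) :
    ((q.length : Int) ≤ (n : Int) ∧
        PySem.List.slice s (some ((n : Int) - (q.length : Int))) (some (n : Int)) = q)
      ↔ PySem.Chars.endswith (s.take n) q = true := by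
  rw [PySem.Chars.endswith_iff]
  constructor
  · rintro ⟨hk, hsl⟩
    have hk' : q.length ≤ n := by exact_mod_cast hk
    rw [show ((n : Int) - (q.length : Int)) = ((n - q.length : Nat) : Int) by omega,
      PySem.List.slice_natCast] at hsl
    have hsplit : s.take n = s.take (n - q.length) ++ q := by
      have h := List.take_add (l := s) (i := n - q.length) (j := n - (n - q.length))
      rw [show (n - q.length) + (n - (n - q.length)) = n by omega] at h
      rw [hsl] at h
      exact h
    rw [hsplit]
    exact List.suffix_append _ _
  · intro hsuf
    have hlq : q.length ≤ n := by
      have h := hsuf.length_le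
      simp only [List.length_take, min_eq_left hn] at h
      exact h
    refine ⟨by exact_mod_cast hlq, ?_⟩
    obtain ⟨t, ht⟩ := hsuf
    have hlt : t.length = n - q.length := by
      have h := congrArg List.length ht
      simp only [List.length_append, List.length_take, min_eq_left hn] at h
      omega
    rw [show ((n : Int) - (q.length : Int)) = ((n - q.length : Nat) : Int) by omega,
      PySem.List.slice_natCast]
    have hdrop : List.drop (n - q.length) (s.take n) = q := by
      rw [← ht]
      exact List.drop_left' hlt
    rw [List.drop_take] at hdrop
    exact hdrop

-- ===== VERDICT (by name: the statement is the Claim_ definition above) =====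
set_option maxHeartbeats 1000000 in
theorem modifyLine_spec : Claim_equal_modifyLine := by
  intro line _
  show modifyLine line = modifyLine_alt line
  simp only [modifyLine, modifyLine_alt]
  by_cases hf : PySem.Chars.isIn "friend_deleteInstance()".toList line.toList = true
  · simp only [hf, if_true]
  · simp only [hf, Bool.false_eq_true, if_false]
    by_cases h0 : PySem.Chars.find line.toList "deleteInstance()".toList = -1
    · rw [h0]
      norm_num
    · have hge : 0 ≤ PySem.Chars.find line.toList "deleteInstance()".toList := by
        have h := PySem.Chars.neg_one_le_find line.toList "deleteInstance()".toList
        omega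
      obtain ⟨n, hn⟩ : ∃ n : Nat,
          PySem.Chars.find line.toList "deleteInstance()".toList = (n : Int) :=
        ⟨_, (Int.toNat_of_nonneg hge).symm⟩
      have hpre : "deleteInstance()".toList <+: line.toList.drop n := by
        have h := (PySem.Chars.find_spec hge).1
        rwa [hn, Int.toNat_natCast] at h
      have hlen16 : n + 16 ≤ line.toList.length := by
        have h1 := hpre.length_le
        have h2 : ("deleteInstance()".toList).length = 16 := by decide
        simp only [List.length_drop, h2] at h1
        omega
      have hnle : n ≤ line.toList.length := by omega
      have hne : ((n : Nat) : Int) ≠ -1 := by omega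
      have hg1 := pvSuffix_iff line.toList "::".toList n hnle
      rw [show (("::".toList.length : Nat) : Int) = 2 by decide] at hg1
      have hg2 := pvSuffix_iff line.toList "void ".toList n hnle
      rw [show (("void ".toList.length : Nat) : Int) = 5 by decide] at hg2
      rw [hn]
      simp only [hne, if_false, Int.natCast_nonneg, if_true,
        PySem.List.slice_to_natCast, hg1, hg2]
      by_cases hc1 : PySem.Chars.endswith (line.toList.take n) "::".toList = true
      · have hb1 : (PySem.Chars.endswith (line.toList.take n) "::".toList
            || PySem.Chars.endswith (line.toList.take n) "void ".toList) = true := by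
          rw [hc1]
          exact Bool.true_or _
        rw [if_pos hc1, if_pos hb1]
      · by_cases hc2 : PySem.Chars.endswith (line.toList.take n) "void ".toList = true
        · rw [Bool.not_eq_true] at hc1
          have hb1 : (PySem.Chars.endswith (line.toList.take n) "::".toList
              || PySem.Chars.endswith (line.toList.take n) "void ".toList) = true := by
            rw [hc1, hc2]
            rfl
          rw [if_neg (by rw [hc1]; exact Bool.false_ne_true), if_pos hc2, if_pos hb1]
        · simp only [hc1, hc2, Bool.false_eq_true, if_false, Bool.or_false]
          -- main branch: A's walks
          rw [pvWalkEnd_spec line.toList n hnle]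
          set t := pvTS (line.toList.take n) with hT
          have htle : t ≤ n := by
            have := pvTS_le (line.toList.take n)
            simp only [List.length_take, min_eq_left hnle] at this
            omega
          rw [show ((n : Int) - 1 - (t : Int)) = ((n - t : Nat) : Int) - 1 by omega]
          rw [pvWalkBegin_spec line.toList (n - t) (by omega)]
          set u := pvTB (line.toList.take (n - t)) with hU
          have hule : u ≤ n - t := by
            have := pvTB_le (line.toList.take (n - t))
            simp only [List.length_take] at this
            omega
          rw [show (((n - t : Nat) : Int) - 1 - (u : Int) + 1) = ((n - t - u : Nat) : Int) by omega]
          rw [show (((n - t : Nat) : Int) - 1 + 1) = ((n - t : Nat) : Int) by omega]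
          -- B's forward scan
          rw [pvScan_spec (line.toList.take n)]
          simp only [List.length_take, min_eq_left hnle, List.take_take,
            show min (n - t) n = n - t from by omega, ← hT, ← hU]
          -- the two if-conditions agree: the name is nonempty iff 0 < u
          have hcond : (PySem.List.slice line.toList (some ((n - t - u : Nat) : Int))
              (some ((n - t : Nat) : Int)) ≠ []) ↔
              (((n - t - u : Nat) : Int) < ((n - t : Nat) : Int)) := by
            rw [PySem.List.slice_natCast]
            constructor
            · intro h
              by_contra hlt
              have : n - t - u = n - t := by omega
              rw [this] at h
              simp at h
            · intro hlt
              have hu0 : 0 < u := by omega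
              have hdlen : (line.toList.drop (n - t - u)).length = line.toList.length - (n - t - u) := by
                simp
              intro hnil
              have := congrArg List.length hnil
              simp only [List.length_take, hdlen, List.length_nil] at this
              omega
          by_cases hname : ((n - t - u : Nat) : Int) < ((n - t : Nat) : Int)
          · rw [if_pos (hcond.mpr hname), if_pos hname]
            simp only [PySem.List.slice_natCast, PySem.List.slice_to_natCast,
              PySem.List.slice_from_natCast, List.drop_take, List.take_take,
              show min (n - t - u) n = n - t - u from by omega,
              show (n - t) - (n - t - u) = u from by omega,
              show min u (n - (n - t - u)) = u from by omega]
          · rw [if_neg (fun h => hname (hcond.mp h)), if_neg hname]
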